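-- pv_equiv track=rewrite | github.com/pypi-data/pypi-mirror-63 | packages/autmux/autmux-0.1.0-py3-none-any.whl/autmux/tmux/utils.py | keystroke_generator
-- ===== SOURCE A (Python) =====
-- from typing import List, Generator
--
-- def keystroke_generator(keystrokes: str) -> Generator[str, None, None]:
--     """ From just keystrokes string, construct a generator,
--     each of its yield is the sendable string.
--     """
--     DELIMITER_START = '<'
--     DELIMITER_END = '>'
--
--     in_delimiters = False
--     tmp_buffer = ''
--
--     for c in keystrokes:
--         if not in_delimiters and c != DELIMITER_START:
--             # Simple character
--             yield c
--
--         elif not in_delimiters and c == DELIMITER_START: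
--             # Start of delimiter
--             tmp_buffer += c
--             in_delimiters = True
--
--         elif c != DELIMITER_END:
--             tmp_buffer += c
--
--         elif c == DELIMITER_END:
--             tmp_buffer += c
--             yield tmp_buffer
--             tmp_buffer = ''
--             in_delimiters = False
-- ===== SOURCE B (Python) =====
-- def keystroke_generator(keystrokes: str):
--     """Index-free scan: jump over '<...>' groups via find+slice; no flag/buffer state."""
--     rest = keystrokes
--     while rest:
--         if rest[0] == '<':
--             j = rest.find('>')
--             if j == -1:
--                 return
--             yield rest[:j + 1]
--             rest = rest[j + 1:]
--         else:
--             yield rest[0]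
--             rest = rest[1:]
-- ===== Notes on version B (the rewrite author's own statement) =====
-- stated objective: simpler
-- what changed: Replaces the stateful char-by-char loop with a boolean flag and a character accumulator by a suffix-driven scan that, at a group opener, finds the first closing delimiter and yields the whole slice at once, maintaining no state.
import Mathlib
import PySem

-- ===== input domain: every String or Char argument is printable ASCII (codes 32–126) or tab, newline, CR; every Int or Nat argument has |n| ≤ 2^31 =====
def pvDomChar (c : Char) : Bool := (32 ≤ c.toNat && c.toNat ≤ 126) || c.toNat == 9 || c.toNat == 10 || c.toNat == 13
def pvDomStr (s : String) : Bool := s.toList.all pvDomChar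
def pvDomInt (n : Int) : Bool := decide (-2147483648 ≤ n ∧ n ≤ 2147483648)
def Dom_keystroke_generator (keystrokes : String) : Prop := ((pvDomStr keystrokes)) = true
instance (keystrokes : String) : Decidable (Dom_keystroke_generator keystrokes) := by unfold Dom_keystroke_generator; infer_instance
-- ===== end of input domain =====

-- B replaces A's stateful flag+buffer character loop by a suffix scan that jumps to the first
-- '>' and yields the whole '<...>' slice at once (objective: simpler). Generators are ported
-- as the list of yielded strings.

-- ===== PORT A =====
-- A's for-loop over the characters, state = (in_delimiters, tmp_buffer); each yield is a cons,
-- branches in A's order.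
def pvALoop : List Char → Bool → List Char → List String
  | [], _, _ => []
  | c :: cs, ind, buf =>
    if ind = false ∧ c ≠ '<' then
      String.ofList [c] :: pvALoop cs ind buf
    else if ind = false ∧ c = '<' then
      pvALoop cs true (buf ++ [c])
    else if c ≠ '>' then
      pvALoop cs ind (buf ++ [c])
    else
      String.ofList (buf ++ [c]) :: pvALoop cs false []

def keystroke_generator (keystrokes : String) : List String :=
  pvALoop keystrokes.toList false []

-- ===== PORT B =====
-- Source B's while-loop on the remaining suffix. 'rest.find(">")' on a suffix whose head is '<'
-- is the position of the first '>' of its tail (exact: the head itself is not '>'), i.e.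
-- takeWhile/dropWhile at (· ≠ '>'); the yielded slice rest[:j+1] is '<' :: takeWhile ++ ['>'].
def pvBGo : List Char → List String
  | [] => []
  | c :: cs =>
    if c = '<' then
      match _h : cs.dropWhile (· ≠ '>') with
      | [] => []  -- find returned -1: stop yielding
      | _ :: rest => String.ofList ('<' :: (cs.takeWhile (· ≠ '>') ++ ['>'])) :: pvBGo rest
    else
      String.ofList [c] :: pvBGo cs
termination_by l => l.length
decreasing_by
  · have h1 : (cs.dropWhile (· ≠ '>')).length ≤ cs.length := cs.length_dropWhile_le _
    rw [_h] at h1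
    simp at h1 ⊢
    omega
  · simp

def keystroke_generator_alt (keystrokes : String) : List String :=
  pvBGo keystrokes.toList

-- ===== PRECONDITION & SPEC =====
def Spec_keystroke_generator (keystrokes : String) (out : List String) : Prop := out = keystroke_generator_alt keystrokes
instance (keystrokes : String) (out : List String) : Decidable (Spec_keystroke_generator keystrokes out) := by unfold Spec_keystroke_generator; infer_instance

-- ===== CLAIM (what is proved, stated in full; the proofs are below) =====
def Claim_equal_keystroke_generator : Prop := ∀ (keystrokes : String), Dom_keystroke_generator keystrokes → Spec_keystroke_generator keystrokes (keystroke_generator keystrokes)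

-- ===== LEMMAS AND PROOFS =====

-- Unfolding equations of pvBGo (well-founded recursion hides them from simp).
theorem pvBGo_cons_ne (c : Char) (cs : List Char) (hc : ¬ c = '<') :
    pvBGo (c :: cs) = String.ofList [c] :: pvBGo cs := by
  rw [pvBGo]; simp [hc]

theorem pvBGo_lt_nil (cs : List Char) (h : cs.dropWhile (· ≠ '>') = []) :
    pvBGo ('<' :: cs) = [] := by
  rw [pvBGo]; rw [if_pos rfl]; split
  · rfl
  · next d rest heq => rw [h] at heq; cases heq

theorem pvBGo_lt_cons (cs : List Char) (d : Char) (rest : List Char)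
    (h : cs.dropWhile (· ≠ '>') = d :: rest) :
    pvBGo ('<' :: cs) = String.ofList ('<' :: (cs.takeWhile (· ≠ '>') ++ ['>'])) :: pvBGo rest := by
  rw [pvBGo]; rw [if_pos rfl]; split
  · next heq => rw [h] at heq; cases heq
  · next d' rest' heq =>
      rw [h] at heq
      cases heq
      rfl

-- A's loop with in_delimiters = true consumes chars into the buffer up to the first '>',
-- then yields the whole buffer; with no '>' left it yields nothing.
theorem pvALoop_true (cs : List Char) : ∀ buf : List Char,
    pvALoop cs true buf =
      match cs.dropWhile (· ≠ '>') with
      | [] => []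
      | _ :: rest => String.ofList (buf ++ cs.takeWhile (· ≠ '>') ++ ['>']) :: pvALoop rest false [] := by
  induction cs with
  | nil => intro buf; simp [pvALoop]
  | cons c cs ih =>
    intro buf
    by_cases hc : c = '>'
    · subst hc
      simp [pvALoop, List.dropWhile, List.takeWhile]
    · rw [show pvALoop (c :: cs) true buf = pvALoop cs true (buf ++ [c]) by
        simp [pvALoop, hc]]
      rw [ih (buf ++ [c])]
      simp [List.dropWhile, List.takeWhile, hc]

theorem pvALoop_eq_pvBGo : ∀ (n : Nat) (l : List Char), l.length ≤ n →
    pvALoop l false [] = pvBGo l := by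
  intro n
  induction n with
  | zero =>
    intro l hl
    have h0 : l = [] := List.eq_nil_of_length_eq_zero (Nat.le_zero.mp hl)
    subst h0; simp [pvALoop, pvBGo]
  | succ n ih =>
    intro l hl
    cases l with
    | nil => simp [pvALoop, pvBGo]
    | cons c cs =>
      by_cases hc : c = '<'
      · subst hc
        rw [show pvALoop ('<' :: cs) false [] = pvALoop cs true ([] ++ ['<']) by
          simp [pvALoop]]
        rw [pvALoop_true]
        cases hdrop : cs.dropWhile (· ≠ '>') with
        | nil => simp [pvBGo_lt_nil cs hdrop]
        | cons d rest =>
          have hlen : rest.length < cs.length := by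
            have h1 : (cs.dropWhile (· ≠ '>')).length ≤ cs.length := cs.length_dropWhile_le _
            rw [hdrop] at h1; simp at h1; omega
          rw [pvBGo_lt_cons cs d rest hdrop]
          simp [ih rest (by simp at hl; omega)]
      · rw [show pvALoop (c :: cs) false [] = String.ofList [c] :: pvALoop cs false [] by
          simp [pvALoop, hc]]
        rw [pvBGo_cons_ne c cs hc, ih cs (by simp at hl; omega)]

-- ===== VERDICT (by name: the statement is the Claim_ definition above) =====
theorem keystroke_generator_spec : Claim_equal_keystroke_generator := by
  intro s _
  unfold Spec_keystroke_generator keystroke_generator keystroke_generator_alt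
  exact pvALoop_eq_pvBGo s.toList.length s.toList le_rfl
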